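-- pv_equiv track=rewrite | github.com/Andrewkha/python-workout | ch07-comprehensions/e32_flipped_dict.py | vowels_dict
-- ===== SOURCE A (Python) =====
-- def vowels_dict(string):
--     """Given a string containing several (space-separated) words, create a dict in which
--     the keys are the words, and the values are the number of vowels in each word. If
--     the string is “this is an easy test,” then the resulting dict would be {'this':1,
--     'is':1, 'an':1, 'easy':2, 'test':1}"""
--
--     def count_vowels(word):
--         vowels = 'aeiou'
--         count = 0
--         for char in word:
--             if char in vowels:
--                 count += 1
--         return count
--
--     return {word: count_vowels(word) for word in string.split()}
-- ===== SOURCE B (Python) =====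
-- def vowels_dict(string):
--     def vowel_total(word):
--         freq = {}
--         for ch in word:
--             freq[ch] = freq.get(ch, 0) + 1
--         return sum(freq.get(v, 0) for v in 'aeiou')
--
--     return {word: vowel_total(word) for word in string.split()}
-- ===== Notes on version B (the rewrite author's own statement) =====
-- stated objective: alternative
-- what changed: B builds a per-word character frequency table in one pass and then sums the counts of the five vowels from it, instead of A's membership-test-per-character counting loop.
import Mathlib
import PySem

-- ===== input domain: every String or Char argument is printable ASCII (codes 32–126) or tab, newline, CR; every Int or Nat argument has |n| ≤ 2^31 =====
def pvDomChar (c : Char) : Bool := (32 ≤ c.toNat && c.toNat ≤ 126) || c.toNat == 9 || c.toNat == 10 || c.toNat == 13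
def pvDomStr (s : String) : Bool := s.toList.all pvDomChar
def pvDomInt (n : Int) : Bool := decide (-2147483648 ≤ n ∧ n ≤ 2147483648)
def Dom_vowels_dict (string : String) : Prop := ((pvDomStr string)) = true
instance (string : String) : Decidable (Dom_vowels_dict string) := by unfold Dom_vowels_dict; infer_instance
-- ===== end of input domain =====

-- B builds a frequency table per word and sums the vowels' counts; A counts by a membership test per character.
-- ===== PORT A =====
-- 'char in vowels' on a 1-char string equals character membership in "aeiou".toList (exact).
def vd_count_vowels (word : String) : Int :=
  word.toList.foldl (fun count char => if "aeiou".toList.contains char then count + 1 else count) 0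

def vowels_dict (string : String) : List (String × Int) :=
  ((PySem.Str.split₀ string).foldl
    (fun d w => d.insert w (vd_count_vowels w)) PySem.Dict.empty).items

-- ===== PORT B =====
def vd_freq (word : String) : PySem.Dict Char Int :=
  word.toList.foldl (fun d ch => d.insert ch (d.getD ch 0 + 1)) PySem.Dict.empty

def vd_vowel_total (word : String) : Int :=
  ("aeiou".toList.map (fun v => (vd_freq word).getD v 0)).sum

def vowels_dict_alt (string : String) : List (String × Int) :=
  ((PySem.Str.split₀ string).foldl
    (fun d w => d.insert w (vd_vowel_total w)) PySem.Dict.empty).items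

-- ===== PRECONDITION & SPEC =====
def Spec_vowels_dict (string : String) (out : List (String × Int)) : Prop := out = vowels_dict_alt string
instance (string : String) (out : List (String × Int)) : Decidable (Spec_vowels_dict string out) := by unfold Spec_vowels_dict; infer_instance

-- ===== CLAIM (what is proved, stated in full; the proofs are below) =====
def Claim_equal_vowels_dict : Prop := ∀ (string : String), Dom_vowels_dict string → Spec_vowels_dict string (vowels_dict string)

-- ===== LEMMAS AND PROOFS =====

-- ===== VERDICT (by name: the statement is the Claim_ definition above) =====
lemma vd_hv : "aeiou".toList = ['a','e','i','o','u'] := by decide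

lemma vd_sum_step (c : Char) (t : List Char) :
  (if (['a','e','i','o','u'] : List Char).contains c then (1:Int) else 0)
      + ((['a','e','i','o','u'] : List Char).map (fun v => (t.count v : Int))).sum
    = ((['a','e','i','o','u'] : List Char).map (fun v => (((c :: t).count v : Nat) : Int))).sum := by
  by_cases hc : c ∈ (['a','e','i','o','u'] : List Char)
  · rw [if_pos (by simpa using hc)]
    fin_cases hc <;> simp [List.count_cons] <;> omega
  · rw [if_neg (by simpa using hc)]
    simp only [List.mem_cons, not_or] at hc
    obtain ⟨h1,h2,h3,h4,h5⟩ := hc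
    simp [List.count_cons, h1, h2, h3, h4, h5]

lemma vd_sum_counts (l : List Char) :
  ((l.countP (fun c => (['a','e','i','o','u'] : List Char).contains c) : Nat) : Int)
    = ((['a','e','i','o','u'] : List Char).map (fun v => (l.count v : Int))).sum := by
  induction l with
  | nil => decide
  | cons c t ih =>
      rw [List.countP_cons, ← vd_sum_step c t, ← ih]
      push_cast
      ring

lemma vd_counts_agree (word : String) : vd_count_vowels word = vd_vowel_total word := by
  unfold vd_count_vowels vd_vowel_total vd_freq
  simp only [PySem.Dict.getD_foldl_insert_add_one, PySem.Dict.getD_empty, vd_hv]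
  rw [PySem.List.foldl_if_add_one]
  rw [vd_sum_counts]
  simp

theorem vowels_dict_spec : Claim_equal_vowels_dict := by
  intro s _
  unfold Spec_vowels_dict vowels_dict vowels_dict_alt
  simp only [vd_counts_agree]
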